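-- pv_equiv track=rewrite | github.com/celikfana-lab/hmic | convert_test.py | frames_to_range_string
-- ===== SOURCE A (Python) =====
-- def frames_to_range_string(frame_list):
--     if not frame_list:
--         return ""
--     if len(frame_list) == 1:
--         return str(frame_list[0])
--
--     ranges = []
--     start = frame_list[0]
--     end = frame_list[0]
--
--     for i in range(1, len(frame_list)):
--         if frame_list[i] == end + 1:
--             end = frame_list[i]
--         else:
--             ranges.append(f"{start}-{end}" if start != end else str(start))
--             start = frame_list[i]
--             end = frame_list[i]
--
--     ranges.append(f"{start}-{end}" if start != end else str(start))
--     return ",".join(ranges)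
-- ===== SOURCE B (Python) =====
-- def frames_to_range_string(frame_list):
--     # Pass 1 (right to left): collect the maximal consecutive runs; the run list and
--     # each run are built back-to-front with O(1) appends and un-reversed afterwards.
--     back = []
--     for x in reversed(frame_list):
--         if back and back[-1][-1] == x + 1:
--             back[-1].append(x)
--         else:
--             back.append([x])
--     chunks = [r[::-1] for r in back[::-1]]
--     # Pass 2: format each run and join.
--     return ",".join(
--         str(c[0]) if c[0] == c[-1] else f"{c[0]}-{c[-1]}" for c in chunks)
-- ===== Notes on version B (the rewrite author's own statement) =====
-- stated objective: alternative
-- what changed: Replaces A's left-to-right single pass with (start,end) state, emit-as-you-go pieces and special cases for empty/singleton input by a right-to-left pass that materializes the maximal consecutive runs as a list of run lists (built back-to-front and un-reversed), followed by a separate formatting pass (map + join) over the runs.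
import Mathlib
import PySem

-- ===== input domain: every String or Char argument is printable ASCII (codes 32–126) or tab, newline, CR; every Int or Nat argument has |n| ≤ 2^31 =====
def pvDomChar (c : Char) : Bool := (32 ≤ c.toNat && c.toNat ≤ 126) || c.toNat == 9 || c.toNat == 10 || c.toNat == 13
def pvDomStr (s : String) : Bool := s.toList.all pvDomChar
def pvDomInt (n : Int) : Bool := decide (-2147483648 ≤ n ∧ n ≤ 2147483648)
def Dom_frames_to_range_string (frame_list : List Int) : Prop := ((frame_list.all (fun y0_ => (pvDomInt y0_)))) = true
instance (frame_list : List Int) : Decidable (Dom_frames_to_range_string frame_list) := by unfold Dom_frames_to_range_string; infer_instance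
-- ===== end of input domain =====

-- B replaces A's left-to-right single pass with (start,end) state (and special cases for
-- empty/singleton input) by a right-to-left pass that materializes the maximal consecutive
-- runs as a list of run lists, then a separate formatting pass (map + join).  Same cost.

-- ===== PORT A =====
-- f"{start}-{end}" if start != end else str(start)
def pvFmtA (s e : Int) : String :=
  if s ≠ e then PySem.Int.toStr s ++ "-" ++ PySem.Int.toStr e else PySem.Int.toStr s

def frames_to_range_string (frame_list : List Int) : String :=
  match frame_list with
  | [] => ""
  | [x] => PySem.Int.toStr x
  | x :: rest =>
    -- for i in range(1, len(frame_list)): fold over the tail with state (ranges, start, end)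
    let st := rest.foldl
      (fun (st : List String × Int × Int) v =>
        if v = st.2.2 + 1 then (st.1, st.2.1, v)
        else (st.1 ++ [pvFmtA st.2.1 st.2.2], v, v))
      ([], x, x)
    PySem.Str.join "," (st.1 ++ [pvFmtA st.2.1 st.2.2])

-- ===== PORT B =====
-- one step of B's loop: `if back and back[-1][-1] == x + 1: back[-1].append(x) else: back.append([x])`
-- (back[-1] / back[-1][-1] are ported with getLastD; Python only evaluates them when
-- back is nonempty, and every run in back is nonempty, so the defaults are never used)
def pvStep (back : List (List Int)) (x : Int) : List (List Int) :=
  if back ≠ [] ∧ (back.getLastD []).getLastD 0 = x + 1 then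
    back.dropLast ++ [back.getLastD [] ++ [x]]
  else back ++ [[x]]

-- str(c[0]) if c[0] == c[-1] else f"{c[0]}-{c[-1]}"
def pvFmtB (first last : Int) : String :=
  if first = last then PySem.Int.toStr first
  else PySem.Int.toStr first ++ "-" ++ PySem.Int.toStr last

-- c[0] raises on an empty c; every run handed to it is nonempty, so "" is never produced
def pvFmtChunk : List Int → String
  | [] => ""
  | v :: t => pvFmtB v ((v :: t).getLastD v)

def frames_to_range_string_alt (frame_list : List Int) : String :=
  -- for x in reversed(frame_list): back = pvStep back x
  let back := frame_list.reverse.foldl pvStep []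
  -- chunks = [r[::-1] for r in back[::-1]]  (the [::-1] slice is exactly List.reverse)
  let chunks := back.reverse.map List.reverse
  PySem.Str.join "," (chunks.map pvFmtChunk)

-- ===== PRECONDITION & SPEC =====
def Spec_frames_to_range_string (frame_list : List Int) (out : String) : Prop := out = frames_to_range_string_alt frame_list
instance (frame_list : List Int) (out : String) : Decidable (Spec_frames_to_range_string frame_list out) := by unfold Spec_frames_to_range_string; infer_instance

-- ===== CLAIM (what is proved, stated in full; the proofs are below) =====
def Claim_equal_frames_to_range_string : Prop := ∀ (frame_list : List Int), Dom_frames_to_range_string frame_list → Spec_frames_to_range_string frame_list (frames_to_range_string frame_list)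

-- ===== LEMMAS AND PROOFS =====

theorem pvFmt_eq (s e : Int) : pvFmtA s e = pvFmtB s e := by
  by_cases h : s = e <;> simp [pvFmtA, pvFmtB, h]

-- reference form of the formatted run list, one element at a time
def pvRunsStr (s e : Int) : List Int → List String
  | [] => [pvFmtB s e]
  | v :: t => if v = e + 1 then pvRunsStr s v t else pvFmtB s e :: pvRunsStr v v t

-- A's fold produces exactly the reference run list
theorem pvFoldA (t : List Int) : ∀ (ranges : List String) (s e : Int),
    (t.foldl
        (fun (st : List String × Int × Int) v =>
          if v = st.2.2 + 1 then (st.1, st.2.1, v)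
          else (st.1 ++ [pvFmtA st.2.1 st.2.2], v, v))
        (ranges, s, e)).1 ++
      [pvFmtA
        (t.foldl
          (fun (st : List String × Int × Int) v =>
            if v = st.2.2 + 1 then (st.1, st.2.1, v)
            else (st.1 ++ [pvFmtA st.2.1 st.2.2], v, v))
          (ranges, s, e)).2.1
        (t.foldl
          (fun (st : List String × Int × Int) v =>
            if v = st.2.2 + 1 then (st.1, st.2.1, v)
            else (st.1 ++ [pvFmtA st.2.1 st.2.2], v, v))
          (ranges, s, e)).2.2] = ranges ++ pvRunsStr s e t := by
  induction t with
  | nil => intro ranges s e; simp [pvRunsStr, pvFmt_eq]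
  | cons v t ih =>
    intro ranges s e
    by_cases h : v = e + 1
    · simpa [List.foldl_cons, h, pvRunsStr] using ih ranges s v
    · simpa [List.foldl_cons, h, pvRunsStr, pvFmt_eq] using ih (ranges ++ [pvFmtA s e]) v v

-- proof-side reference for B: the functional (front-to-back) form of the run grouping
def pvAddRev (x : Int) (chunks : List (List Int)) : List (List Int) :=
  match chunks with
  | (y :: c) :: rest => if y = x + 1 then (x :: y :: c) :: rest else [x] :: (y :: c) :: rest
  | _ => [x] :: chunks

-- the head chunk produced by pvAddRev starts with the element just processed
theorem pvAddRev_head (x : Int) (l : List (List Int)) :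
    ∃ c rest, pvAddRev x l = (x :: c) :: rest := by
  match l with
  | [] => exact ⟨[], [], rfl⟩
  | [] :: rest => exact ⟨[], [] :: rest, rfl⟩
  | (y :: c) :: rest =>
    by_cases h : y = x + 1
    · exact ⟨y :: c, rest, by simp [pvAddRev, h]⟩
    · exact ⟨[], (y :: c) :: rest, by simp [pvAddRev, h]⟩

-- every run built by the grouping is nonempty
theorem pvAddRev_ne_nil (x : Int) (chunks : List (List Int))
    (h : ∀ c ∈ chunks, c ≠ []) : ∀ c' ∈ pvAddRev x chunks, c' ≠ [] := by
  match chunks with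
  | [] => intro c' hc'; simp [pvAddRev] at hc'; simp [hc']
  | [] :: rest => exact absurd rfl (h [] (by simp))
  | (y :: c) :: rest =>
    intro c' hc'
    by_cases hy : y = x + 1
    · simp [pvAddRev, hy] at hc'
      rcases hc' with h1 | h1
      · simp [h1]
      · exact h c' (by simp [h1])
    · simp [pvAddRev, hy] at hc'
      rcases hc' with h1 | h1 | h1
      · simp [h1]
      · simp [h1]
      · exact h c' (by simp [h1])

theorem pvFoldr_ne_nil (l : List Int) : ∀ c ∈ l.foldr pvAddRev [], c ≠ [] := by
  induction l with
  | nil => intro c hc; simp at hc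
  | cons x l ih => exact pvAddRev_ne_nil x (l.foldr pvAddRev []) ih

-- one imperative step on the back-to-front representation is one pvAddRev step
theorem pvStep_comm (x : Int) (chunks : List (List Int)) (h : ∀ c ∈ chunks, c ≠ []) :
    pvStep ((chunks.map List.reverse).reverse) x = ((pvAddRev x chunks).map List.reverse).reverse := by
  match chunks with
  | [] => simp [pvStep, pvAddRev]
  | [] :: rest => exact absurd rfl (h [] (by simp))
  | (y :: c) :: rest =>
    have hrep : (((y :: c) :: rest).map List.reverse).reverse
        = (rest.map List.reverse).reverse ++ [c.reverse ++ [y]] := by simp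
    by_cases hy : y = x + 1
    · rw [hrep]
      have hne : (rest.map List.reverse).reverse ++ [c.reverse ++ [y]] ≠ [] := by simp
      have hlast : (((rest.map List.reverse).reverse ++ [c.reverse ++ [y]]).getLastD [])
          = c.reverse ++ [y] := by simp
      rw [pvStep, if_pos ⟨hne, by rw [hlast]; simp [hy]⟩]
      simp [pvAddRev, hy]
    · rw [hrep]
      rw [pvStep, if_neg ?_]
      · simp [pvAddRev, hy]
      · rintro ⟨-, hbad⟩
        rw [show (((rest.map List.reverse).reverse ++ [c.reverse ++ [y]]).getLastD [])
            = c.reverse ++ [y] by simp] at hbad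
        simp at hbad
        exact hy hbad

-- B's imperative loop computes the reversed representation of the functional grouping
theorem pvLoopB (l : List Int) :
    l.reverse.foldl pvStep [] = ((l.foldr pvAddRev []).map List.reverse).reverse := by
  induction l with
  | nil => simp
  | cons x l ih =>
    have : (x :: l).reverse.foldl pvStep [] = pvStep (l.reverse.foldl pvStep []) x := by
      simp [List.foldl_append]
    rw [this, ih, pvStep_comm x _ (pvFoldr_ne_nil l)]
    rfl

-- B's chunks list is exactly the functional grouping
theorem pvChunksB (l : List Int) :
    (l.reverse.foldl pvStep []).reverse.map List.reverse = l.foldr pvAddRev [] := by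
  rw [pvLoopB]
  simp [List.map_map]

-- B's chunks, formatted with the current run's true start s, match the reference run list
theorem pvL (t : List Int) : ∀ (e s : Int) (c : List Int) (rest : List (List Int)),
    (e :: t).foldr pvAddRev [] = (e :: c) :: rest →
    pvFmtB s ((e :: c).getLastD e) :: rest.map pvFmtChunk = pvRunsStr s e t := by
  induction t with
  | nil =>
    intro e s c rest h
    have h' : [[e]] = (e :: c) :: rest := h
    injection h' with h1 h2
    injection h1 with _ h4
    subst h2; subst h4
    simp [pvRunsStr, List.getLastD]
  | cons v t ih =>
    intro e s c rest h
    obtain ⟨c', rest', h'⟩ := pvAddRev_head v (t.foldr pvAddRev [])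
    have hfold : (v :: t).foldr pvAddRev [] = (v :: c') :: rest' := h'
    rw [show (e :: v :: t).foldr pvAddRev [] = pvAddRev e ((v :: t).foldr pvAddRev []) from rfl,
        hfold] at h
    by_cases hv : v = e + 1
    · subst hv
      rw [show pvAddRev e (((e + 1) :: c') :: rest') = (e :: (e + 1) :: c') :: rest' by
        simp [pvAddRev]] at h
      injection h with h1 h2
      injection h1 with _ h3
      subst h2; subst h3
      simpa [pvRunsStr, List.getLastD_cons] using ih (e + 1) s c' rest' hfold
    · simp only [pvAddRev, if_neg (by omega : ¬ v = e + 1)] at h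
      have hc : ([] : List Int) = c := by
        have := congrArg (fun l => List.headD l []) h; simpa using this
      have hr : (v :: c') :: rest' = rest := by
        have := congrArg List.tail h; simpa using this
      subst hc hr
      have := ih v v c' rest' hfold
      rw [pvRunsStr, if_neg hv, ← this]
      simp [pvFmtChunk]

theorem pvChunks_runs (x : Int) (t : List Int) :
    ((x :: t).foldr pvAddRev []).map pvFmtChunk = pvRunsStr x x t := by
  obtain ⟨c, rest, h⟩ := pvAddRev_head x (t.foldr pvAddRev [])
  have hfold : (x :: t).foldr pvAddRev [] = (x :: c) :: rest := h
  rw [hfold, List.map_cons]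
  have := pvL t x x c rest hfold
  rw [← this]
  simp [pvFmtChunk]

theorem pvAlt_runs (l : List Int) :
    frames_to_range_string_alt l = PySem.Str.join "," ((l.foldr pvAddRev []).map pvFmtChunk) := by
  show PySem.Str.join "," (((l.reverse.foldl pvStep []).reverse.map List.reverse).map pvFmtChunk) = _
  rw [pvChunksB]

-- ===== VERDICT (by name: the statement is the Claim_ definition above) =====
theorem frames_to_range_string_spec : Claim_equal_frames_to_range_string := by
  intro frame_list _
  show frames_to_range_string frame_list = frames_to_range_string_alt frame_list
  rw [pvAlt_runs]
  match frame_list with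
  | [] => rfl
  | [x] =>
    show PySem.Int.toStr x = PySem.Str.join "," (([x].foldr pvAddRev []).map pvFmtChunk)
    rw [pvChunks_runs]
    simp [pvRunsStr, pvFmtB, PySem.Str.join]
    rfl
  | x :: v :: rest =>
    show PySem.Str.join "," _ = PySem.Str.join "," _
    rw [pvChunks_runs]
    have h := pvFoldA (v :: rest) [] x x
    rw [List.nil_append] at h
    rw [h]
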